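-- pv_equiv track=rewrite | github.com/smitha13798/bomberman_rl | agent_code/dqn_age4/train.py | is_in_bomb_range
-- ===== SOURCE A (Python) =====
-- def is_in_bomb_range(agent_position, bomb_positions, bomb_range=3):
--     """
--     Check if the agent is within the range of any bombs.
--
--     Args:
--         agent_position (tuple)): The (x, y)) position of the agent.
--         bomb_positions (list of tuples)): List of bomb positions.
--         bomb_range (int)): The blast radius of the bombs.
--
--     Returns:
--         bool: True if the agent is in the blast radius of any bomb, False otherwise.
--     """
--     agent_x, agent_y = agent_position
--
--     for bomb_position in bomb_positions:
--         bomb_x, bomb_y = bomb_position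
--
--         # Check if the agent is in the same row or column as the bomb and within the blast radius
--         if agent_x == bomb_x and abs(agent_y - bomb_y) <= bomb_range:
--             return True
--         if agent_y == bomb_y and abs(agent_x - bomb_x) <= bomb_range:
--             return True
--
--     return False
-- ===== SOURCE B (Python) =====
-- def is_in_bomb_range(agent_position, bomb_positions, bomb_range=3):
--     ax, ay = agent_position
--     # Stage 1: distances to bombs sharing the agent's column (same x) and row (same y).
--     row_dists = [abs(ay - by) for bx, by in bomb_positions if bx == ax]
--     col_dists = [abs(ax - bx) for bx, by in bomb_positions if by == ay]
--     # Stage 2: the agent is in range iff the nearest axis-aligned bomb is within bomb_range.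
--     return min(row_dists + col_dists, default=bomb_range + 1) <= bomb_range
-- ===== Notes on version B (the rewrite author's own statement) =====
-- stated objective: alternative
-- what changed: Replaces A's single short-circuit scan with per-bomb two-branch tests by a staged pipeline: first materialize the lists of distances to bombs on the agent's row and on its column, then decide via one minimum-with-default comparison against bomb_range.
import Mathlib
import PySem

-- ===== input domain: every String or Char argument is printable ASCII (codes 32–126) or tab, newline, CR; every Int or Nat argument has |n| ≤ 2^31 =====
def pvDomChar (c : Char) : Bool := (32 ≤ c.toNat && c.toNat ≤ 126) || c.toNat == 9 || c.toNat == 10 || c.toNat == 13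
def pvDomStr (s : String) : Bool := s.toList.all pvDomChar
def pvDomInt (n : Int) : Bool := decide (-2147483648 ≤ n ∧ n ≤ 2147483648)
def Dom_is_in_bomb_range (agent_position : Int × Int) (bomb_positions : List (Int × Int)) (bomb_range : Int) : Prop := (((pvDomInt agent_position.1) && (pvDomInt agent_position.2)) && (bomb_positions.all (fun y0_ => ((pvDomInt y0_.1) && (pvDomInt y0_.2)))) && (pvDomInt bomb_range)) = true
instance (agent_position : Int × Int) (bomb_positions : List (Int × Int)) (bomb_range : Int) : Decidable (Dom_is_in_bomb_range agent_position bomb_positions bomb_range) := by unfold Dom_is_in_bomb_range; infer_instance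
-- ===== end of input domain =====

-- B restructures A's short-circuit per-bomb branch scan into a staged pipeline (collect axis-aligned
-- bomb distances, then compare their minimum-with-default to the range); objective: alternative.

-- ===== PORT A =====
def is_in_bomb_range (agent_position : Int × Int) (bomb_positions : List (Int × Int)) (bomb_range : Int) : Bool :=
  match bomb_positions with
  | [] => false
  | bomb_position :: rest =>
    if agent_position.1 = bomb_position.1 ∧ |agent_position.2 - bomb_position.2| ≤ bomb_range then true
    else if agent_position.2 = bomb_position.2 ∧ |agent_position.1 - bomb_position.1| ≤ bomb_range then true
    else is_in_bomb_range agent_position rest bomb_range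

-- ===== PORT B =====
def is_in_bomb_range_alt (agent_position : Int × Int) (bomb_positions : List (Int × Int)) (bomb_range : Int) : Bool :=
  let row_dists := (bomb_positions.filter (fun b => b.1 == agent_position.1)).map
    (fun b => |agent_position.2 - b.2|)
  let col_dists := (bomb_positions.filter (fun b => b.2 == agent_position.2)).map
    (fun b => |agent_position.1 - b.1|)
  decide (PySem.List.minD (row_dists ++ col_dists) (fun x => x) (bomb_range + 1) ≤ bomb_range)

-- ===== PRECONDITION & SPEC =====
def Spec_is_in_bomb_range (agent_position : Int × Int) (bomb_positions : List (Int × Int)) (bomb_range : Int) (out : Bool) : Prop := out = is_in_bomb_range_alt agent_position bomb_positions bomb_range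
instance (agent_position : Int × Int) (bomb_positions : List (Int × Int)) (bomb_range : Int) (out : Bool) : Decidable (Spec_is_in_bomb_range agent_position bomb_positions bomb_range out) := by unfold Spec_is_in_bomb_range; infer_instance

-- ===== CLAIM (what is proved, stated in full; the proofs are below) =====
def Claim_equal_is_in_bomb_range : Prop := ∀ (agent_position : Int × Int) (bomb_positions : List (Int × Int)) (bomb_range : Int), Dom_is_in_bomb_range agent_position bomb_positions bomb_range → Spec_is_in_bomb_range agent_position bomb_positions bomb_range (is_in_bomb_range agent_position bomb_positions bomb_range)

-- ===== LEMMAS AND PROOFS =====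

-- A's scan returns true iff some bomb passes one of the two branch tests
lemma pv_A_any (ap : Int × Int) (bombs : List (Int × Int)) (r : Int) :
    is_in_bomb_range ap bombs r =
      bombs.any (fun b =>
        decide ((ap.1 = b.1 ∧ |ap.2 - b.2| ≤ r) ∨ (ap.2 = b.2 ∧ |ap.1 - b.1| ≤ r))) := by
  induction bombs with
  | nil => rfl
  | cons b rest ih =>
    simp only [is_in_bomb_range, List.any_cons, ih]
    split_ifs with hA hB
    · simp [hA]
    · simp [hB]
    · simp [hA, hB]

-- min-with-default d (where d exceeds the bound) is ≤ r iff some list element is ≤ r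
lemma pv_minD_le_iff (L : List Int) (d r : Int) (hd : ¬ d ≤ r) :
    (PySem.List.minD L (fun x => x) d ≤ r) ↔ ∃ x ∈ L, x ≤ r := by
  unfold PySem.List.minD
  cases h : PySem.List.min? L (fun x => x) with
  | none =>
    rw [PySem.List.min?_eq_none_iff] at h
    simp [h, hd]
  | some m =>
    simp only [Option.getD_some]
    constructor
    · exact fun hm => ⟨m, PySem.List.min?_mem h, hm⟩
    · rintro ⟨x, hx, hxr⟩
      exact le_trans (PySem.List.min?_isMin h x hx) hxr

-- ===== VERDICT (by name: the statement is the Claim_ definition above) =====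
theorem is_in_bomb_range_spec : Claim_equal_is_in_bomb_range := by
  intro ap bombs r _
  unfold Spec_is_in_bomb_range
  rw [pv_A_any]
  unfold is_in_bomb_range_alt
  rw [Bool.eq_iff_iff]
  simp only [List.any_eq_true, decide_eq_true_eq,
    pv_minD_le_iff _ _ _ (by omega : ¬ r + 1 ≤ r),
    List.mem_append, List.mem_map, List.mem_filter, beq_iff_eq]
  constructor
  · rintro ⟨b, hb, h | h⟩
    · exact ⟨_, Or.inl ⟨b, ⟨hb, h.1.symm⟩, rfl⟩, h.2⟩
    · exact ⟨_, Or.inr ⟨b, ⟨hb, h.1.symm⟩, rfl⟩, h.2⟩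
  · rintro ⟨x, ⟨b, ⟨hb, he⟩, rfl⟩ | ⟨b, ⟨hb, he⟩, rfl⟩, hx⟩
    · exact ⟨b, hb, Or.inl ⟨he.symm, hx⟩⟩
    · exact ⟨b, hb, Or.inr ⟨he.symm, hx⟩⟩
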